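-- pv_equiv track=rewrite | github.com/Hangjun/PyLeetCode | 0296. Best Meeting Point.py | minTotalDistance1D
-- ===== SOURCE A (Python) =====
-- def minTotalDistance1D(coords):
--     dist = 0
--     i, j = 0, len(coords)-1
--     while i < j:
--         dist += coords[j] - coords[i]
--         i +=1
--         j -= 1
--     return dist
-- ===== SOURCE B (Python) =====
-- def minTotalDistance1D(coords):
--     # Gap-weighted formulation: each consecutive gap coords[k+1]-coords[k] is
--     # crossed by min(k+1, n-1-k) of the outer-to-inner pairs.
--     n = len(coords)
--     return sum(min(k + 1, n - 1 - k) * (coords[k + 1] - coords[k]) for k in range(n - 1))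
-- ===== Notes on version B (the rewrite author's own statement) =====
-- stated objective: alternative
-- what changed: Replaces A's two-pointer outer-to-inner pairing loop with a single pass over consecutive gaps, summing each gap coords[k+1]-coords[k] weighted by min(k+1, n-1-k), the number of pairs that cross it.
import Mathlib
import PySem

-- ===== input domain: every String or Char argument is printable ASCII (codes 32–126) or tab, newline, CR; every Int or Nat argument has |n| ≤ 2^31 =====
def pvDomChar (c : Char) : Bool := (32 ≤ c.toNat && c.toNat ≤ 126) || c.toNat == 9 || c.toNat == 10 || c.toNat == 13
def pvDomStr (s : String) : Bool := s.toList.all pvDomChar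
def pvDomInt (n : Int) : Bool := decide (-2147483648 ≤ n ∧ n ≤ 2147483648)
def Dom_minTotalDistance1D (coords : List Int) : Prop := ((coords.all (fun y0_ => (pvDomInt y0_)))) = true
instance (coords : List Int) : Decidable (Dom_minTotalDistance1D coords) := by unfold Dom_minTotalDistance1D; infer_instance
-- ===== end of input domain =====

-- B replaces A's two-pointer pairing loop with a single pass over consecutive gaps,
-- each gap weighted by the number of pairs that cross it (alternative algorithm).

-- ===== PORT A =====
-- the while loop; indices always satisfy 0 ≤ i < j ≤ len-1 when read, so the getD 0 default never fires
def pvLoopA (coords : List Int) (i j dist : Int) : Int :=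
  if i < j then
    pvLoopA coords (i + 1) (j - 1)
      (dist + (((PySem.List.pyGet? coords j).getD 0) - ((PySem.List.pyGet? coords i).getD 0)))
  else dist
termination_by (j - i).toNat
decreasing_by omega

def minTotalDistance1D (coords : List Int) : Int :=
  pvLoopA coords 0 ((coords.length : Int) - 1) 0

-- ===== PORT B =====
-- sum over the generator: sum(min(k+1, n-1-k) * (coords[k+1] - coords[k]) for k in range(n-1))
def minTotalDistance1D_alt (coords : List Int) : Int :=
  let n : Int := coords.length
  ((PySem.List.pyRange 0 (n - 1) 1).map (fun k =>
      min (k + 1) (n - 1 - k) *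
        (((PySem.List.pyGet? coords (k + 1)).getD 0) - ((PySem.List.pyGet? coords k).getD 0)))).sum

-- ===== PRECONDITION & SPEC =====
def Spec_minTotalDistance1D (coords : List Int) (out : Int) : Prop := out = minTotalDistance1D_alt coords
instance (coords : List Int) (out : Int) : Decidable (Spec_minTotalDistance1D coords out) := by unfold Spec_minTotalDistance1D; infer_instance

-- ===== CLAIM (what is proved, stated in full; the proofs are below) =====
def Claim_equal_minTotalDistance1D : Prop := ∀ (coords : List Int), Dom_minTotalDistance1D coords → Spec_minTotalDistance1D coords (minTotalDistance1D coords)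

-- ===== LEMMAS AND PROOFS =====

-- A's loop computes the range-sum of outer-to-inner differences
lemma pvLoopA_eq (coords : List Int) :
    ∀ (m : Nat) (i j : Nat) (d : Int), (j + 1 - i) / 2 = m →
      pvLoopA coords (i : Int) (j : Int) d
        = d + ∑ k ∈ Finset.range m, (coords.getD (j - k) 0 - coords.getD (i + k) 0) := by
  intro m
  induction m with
  | zero =>
    intro i j d hm
    rw [pvLoopA]
    have : ¬ ((i : Int) < (j : Int)) := by
      have : ¬ (i < j) := by omega
      exact_mod_cast this
    simp [this]
  | succ m ih =>
    intro i j d hm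
    have hij : i < j := by omega
    rw [pvLoopA]
    have hij' : (i : Int) < (j : Int) := by exact_mod_cast hij
    rw [if_pos hij']
    have hi1 : (i : Int) + 1 = ((i + 1 : Nat) : Int) := by push_cast; ring
    have hj1 : (j : Int) - 1 = ((j - 1 : Nat) : Int) := by omega
    rw [hi1, hj1, ih (i + 1) (j - 1) _ (by omega)]
    rw [Finset.sum_range_succ']
    have hterm :
        ∀ k ∈ Finset.range m,
          (coords.getD (j - 1 - k) 0 - coords.getD (i + 1 + k) 0)
            = (coords.getD (j - (k + 1)) 0 - coords.getD (i + (k + 1)) 0) := by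
      intro k _
      congr 2 <;> omega
    rw [Finset.sum_congr rfl hterm]
    have hgi : (PySem.List.pyGet? coords (i : Int)).getD 0 = coords.getD (i + 0) 0 := by
      simp [PySem.List.pyGet?_natCast, List.getD]
    have hgj : (PySem.List.pyGet? coords (j : Int)).getD 0 = coords.getD (j - 0) 0 := by
      simp [PySem.List.pyGet?_natCast, List.getD]
    rw [hgi, hgj]
    ring

-- gap-weighted sum over [i, j) equals the outer-to-inner pair sum on [i, j]
lemma gapSum_eq (coords : List Int) :
    ∀ (m : Nat) (i j : Nat), (j + 1 - i) / 2 = m →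
      (∑ k ∈ Finset.Ico i j,
          ((min (k + 1 - i) (j - k) : Nat) : Int) * (coords.getD (k + 1) 0 - coords.getD k 0))
        = ∑ t ∈ Finset.range m, (coords.getD (j - t) 0 - coords.getD (i + t) 0) := by
  intro m
  induction m with
  | zero =>
    intro i j hm
    have hji : j ≤ i := by omega
    rw [Finset.Ico_eq_empty (by simpa using hji)]
    simp
  | succ m ih =>
    intro i j hm
    have hij : i < j := by omega
    -- split each weight into (inner weight) + 1
    have hsplit :
        ∀ k ∈ Finset.Ico i j,
          ((min (k + 1 - i) (j - k) : Nat) : Int) * (coords.getD (k + 1) 0 - coords.getD k 0)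
            = ((min (k + 1 - (i + 1)) (j - 1 - k) : Nat) : Int)
                * (coords.getD (k + 1) 0 - coords.getD k 0)
              + (coords.getD (k + 1) 0 - coords.getD k 0) := by
      intro k hk
      simp only [Finset.mem_Ico] at hk
      have : (min (k + 1 - i) (j - k) : Nat) = min (k + 1 - (i + 1)) (j - 1 - k) + 1 := by
        omega
      rw [this]
      push_cast
      ring
    rw [Finset.sum_congr rfl hsplit, Finset.sum_add_distrib]
    -- the telescoping part
    have htel :
        (∑ k ∈ Finset.Ico i j, (coords.getD (k + 1) 0 - coords.getD k 0))
          = coords.getD j 0 - coords.getD i 0 := by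
      rw [Finset.sum_Ico_eq_sum_range]
      have := Finset.sum_range_sub (f := fun t => coords.getD (i + t) 0) (n := j - i)
      simp only at this
      have harg : ∀ k ∈ Finset.range (j - i),
          (coords.getD (i + k + 1) 0 - coords.getD (i + k) 0)
            = (coords.getD (i + (k + 1)) 0 - coords.getD (i + k) 0) := by
        intro k _; rw [Nat.add_assoc]
      rw [Finset.sum_congr rfl harg, this]
      have h1 : i + (j - i) = j := by omega
      rw [h1]
      simp
    -- the inner part: boundary weights are zero, shrink to Ico (i+1) (j-1)
    have hshrink :
        (∑ k ∈ Finset.Ico i j,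
            ((min (k + 1 - (i + 1)) (j - 1 - k) : Nat) : Int)
              * (coords.getD (k + 1) 0 - coords.getD k 0))
          = ∑ k ∈ Finset.Ico (i + 1) (j - 1),
              ((min (k + 1 - (i + 1)) (j - 1 - k) : Nat) : Int)
                * (coords.getD (k + 1) 0 - coords.getD k 0) := by
      symm
      apply Finset.sum_subset
      · apply Finset.Ico_subset_Ico <;> omega
      · intro k hk hnk
        simp only [Finset.mem_Ico] at hk hnk
        have : (min (k + 1 - (i + 1)) (j - 1 - k) : Nat) = 0 := by omega
        rw [this]
        simp
    rw [hshrink, ih (i + 1) (j - 1) (by omega), htel]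
    -- reassemble the pair sum
    rw [Finset.sum_range_succ']
    have hterm :
        ∀ t ∈ Finset.range m,
          (coords.getD (j - 1 - t) 0 - coords.getD (i + 1 + t) 0)
            = (coords.getD (j - (t + 1)) 0 - coords.getD (i + (t + 1)) 0) := by
      intro t _
      congr 2 <;> omega
    rw [Finset.sum_congr rfl hterm]
    simp

-- list-range sum bridge
lemma sum_map_range_eq (f : Nat → Int) (n : Nat) :
    ((List.range n).map f).sum = ∑ k ∈ Finset.range n, f k := by
  induction n with
  | zero => simp
  | succ n ih => rw [List.range_succ, Finset.sum_range_succ, List.map_append, List.sum_append, ih]; simp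

-- ===== VERDICT (by name: the statement is the Claim_ definition above) =====
theorem minTotalDistance1D_spec : Claim_equal_minTotalDistance1D := by
  intro coords _
  unfold Spec_minTotalDistance1D minTotalDistance1D minTotalDistance1D_alt
  dsimp only
  set n := coords.length with hnd
  -- rewrite B into a Finset sum over range (n-1)
  rw [PySem.List.pyRange_one]
  have hlen : (((n : Int) - 1) - 0).toNat = n - 1 := by omega
  rw [hlen, List.map_map, sum_map_range_eq]
  have hB :
      ∀ k ∈ Finset.range (n - 1),
        ((fun k => min (k + 1) ((n : Int) - 1 - k) *
            (((PySem.List.pyGet? coords (k + 1)).getD 0) - ((PySem.List.pyGet? coords k).getD 0)))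
          ∘ fun k : Nat => (0 : Int) + (k : Int)) k
          = ((min (k + 1 - 0) ((n - 1) - k) : Nat) : Int) * (coords.getD (k + 1) 0 - coords.getD k 0) := by
    intro k hk
    simp only [Finset.mem_range] at hk
    simp only [Function.comp, zero_add]
    have hmin : min ((k : Int) + 1) ((n : Int) - 1 - (k : Int)) = ((min (k + 1 - 0) ((n - 1) - k) : Nat) : Int) := by
      push_cast [Nat.cast_min]
      omega
    have hk1 : (k : Int) + 1 = ((k + 1 : Nat) : Int) := by push_cast; ring
    have hg1 : (PySem.List.pyGet? coords ((k + 1 : Nat) : Int)).getD 0 = coords.getD (k + 1) 0 := by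
      rw [PySem.List.pyGet?_natCast]
      simp [List.getD]
    have hg0 : (PySem.List.pyGet? coords (k : Int)).getD 0 = coords.getD k 0 := by
      simp [PySem.List.pyGet?_natCast, List.getD]
    rw [hmin, hk1, hg1, hg0]
  rw [Finset.sum_congr rfl hB]
  -- A side
  rcases Nat.eq_zero_or_pos n with hn | hn
  · rw [pvLoopA]
    have : ¬ ((0 : Int) < (n : Int) - 1) := by omega
    rw [if_neg this]
    simp [hn]
  · have hcast : (n : Int) - 1 = ((n - 1 : Nat) : Int) := by omega
    rw [hcast]
    have hA := pvLoopA_eq coords (n / 2) 0 (n - 1) 0 (by omega)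
    simp only [Nat.cast_zero] at hA
    have hG := gapSum_eq coords (n / 2) 0 (n - 1) (by omega)
    rw [hA, ← hG, Finset.range_eq_Ico]
    simp
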